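-- pv_equiv track=rewrite | github.com/Aasthaengg/IBMdataset | Python_codes/p03281/s441326841.py | check
-- ===== SOURCE A (Python) =====
-- def check(n):
--     count = 0
--     for i in range(1, n + 1):
--         if(n % i == 0):
--             count += 1
--     if(count == 8 and n % 2 != 0):
--         return True
--     else:
--         return False
-- ===== SOURCE B (Python) =====
-- def check(n):
--     if n % 2 == 0:
--         return False
--     count = 0
--     i = 1
--     while i * i <= n:
--         if n % i == 0:
--             count += 1 if i * i == n else 2
--         i += 1
--     return count == 8
-- ===== Notes on version B (the rewrite author's own statement) =====
-- stated objective: faster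
-- what changed: counts divisors by iterating only up to the square root of n, counting each divisor together with its paired cofactor (once for an exact square root) and exiting early for even n, instead of scanning every candidate from one to n
import Mathlib
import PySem

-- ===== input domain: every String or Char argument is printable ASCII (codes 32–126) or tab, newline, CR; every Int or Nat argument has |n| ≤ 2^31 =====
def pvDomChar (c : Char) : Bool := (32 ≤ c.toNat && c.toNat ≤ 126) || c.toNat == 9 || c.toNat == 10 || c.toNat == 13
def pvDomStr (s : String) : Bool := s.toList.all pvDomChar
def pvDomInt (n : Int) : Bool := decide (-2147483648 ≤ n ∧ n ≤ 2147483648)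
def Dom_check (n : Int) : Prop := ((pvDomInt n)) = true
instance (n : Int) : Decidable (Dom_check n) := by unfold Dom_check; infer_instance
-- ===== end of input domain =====

-- B counts divisors by pairing i with n // i up to sqrt(n) (O(sqrt n)) instead of A's full scan of 1..n.

-- ===== PORT A =====
def check (n : Int) : Bool :=
  let count : Int :=
    (PySem.List.pyRange 1 (n + 1) 1).foldl
      (fun count i => if PySem.Int.mod n i == 0 then count + 1 else count) 0
  if count == 8 && PySem.Int.mod n 2 != 0 then true else false

-- ===== PORT B =====
-- the while loop of Source B: i, count are the mutated state
def checkAltLoop (n i count : Int) : Int :=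
  if h : i * i ≤ n then
    checkAltLoop n (i + 1)
      (if PySem.Int.mod n i == 0 then count + (if i * i == n then 1 else 2) else count)
  else count
termination_by (n + 1 - i).toNat
decreasing_by
  have hin : i ≤ n := by nlinarith [mul_self_nonneg (i - 1), mul_self_nonneg i]
  omega

def check_alt (n : Int) : Bool :=
  if PySem.Int.mod n 2 == 0 then false
  else checkAltLoop n 1 0 == 8

-- ===== PRECONDITION & SPEC =====
def Spec_check (n : Int) (out : Bool) : Prop := out = check_alt n
instance (n : Int) (out : Bool) : Decidable (Spec_check n out) := by unfold Spec_check; infer_instance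

-- ===== CLAIM (what is proved, stated in full; the proofs are below) =====
def Claim_equal_check : Prop := ∀ (n : Int), Dom_check n → Spec_check n (check n)

-- ===== LEMMAS AND PROOFS =====

-- countP over a step-1 Python range is a filtered-interval cardinality
theorem countP_pyRange (p : Int → Bool) (a b : Int) :
    (PySem.List.pyRange a b 1).countP p
      = ((Finset.Ico a b).filter (fun i => p i = true)).card := by
  by_cases h : b ≤ a
  · rw [PySem.List.pyRange_one_eq_nil h]
    rw [Finset.Ico_eq_empty (by omega)]
    simp
  · rw [not_le] at h
    rw [PySem.List.pyRange_one_cons h, List.countP_cons]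
    have hIco : Finset.Ico a b = insert a (Finset.Ico (a + 1) b) := by
      ext x; simp only [Finset.mem_Ico, Finset.mem_insert]; omega
    have hnot : a ∉ (Finset.Ico (a + 1) b).filter (fun i => p i = true) := by
      simp [Finset.mem_filter]
    rw [hIco, Finset.filter_insert, countP_pyRange p (a + 1) b]
    by_cases hp : p a = true
    · simp [hp, Finset.card_insert_of_notMem hnot]
    · simp [hp]
termination_by (b - a).toNat
decreasing_by omega

-- A's count as a divisor-set cardinality
theorem check_count (n : Int) :
    (PySem.List.pyRange 1 (n + 1) 1).countP (fun i => PySem.Int.mod n i == 0)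
      = ((Finset.Icc 1 n).filter (fun i => i ∣ n)).card := by
  rw [countP_pyRange]
  congr 1
  ext i
  simp only [Finset.mem_filter, Finset.mem_Ico, Finset.mem_Icc, beq_iff_eq]
  constructor
  · rintro ⟨hi, hp⟩
    exact ⟨by omega, (PySem.Int.mod_eq_zero_iff_dvd n i).mp hp⟩
  · rintro ⟨hi, hd⟩
    exact ⟨by omega, (PySem.Int.mod_eq_zero_iff_dvd n i).mpr hd⟩

-- pairing d ↦ n / d: as many divisors above sqrt(n) as below
theorem card_big_eq_card_small (n : Int) (hn : 1 ≤ n) :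
    ((Finset.Icc 1 n).filter (fun d => d ∣ n ∧ n < d * d)).card
      = ((Finset.Icc 1 n).filter (fun d => d ∣ n ∧ d * d < n)).card := by
  apply Finset.card_nbij' (fun d => n / d) (fun d => n / d)
  · rintro d hd
    simp only [Finset.coe_filter, Finset.mem_Icc, Set.mem_setOf_eq] at hd ⊢
    obtain ⟨⟨h1, h2⟩, ⟨k, hk⟩, hbig⟩ := hd
    have hd0 : d ≠ 0 := by omega
    have hq : n / d = k := by rw [hk]; exact Int.mul_ediv_cancel_left k hd0
    have hk1 : 1 ≤ k := by nlinarith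
    have hklt : k < d := by nlinarith
    refine ⟨⟨by omega, by rw [hq]; nlinarith⟩, ⟨d, by rw [hq]; linarith [hk, mul_comm d k]⟩, by rw [hq]; nlinarith⟩
  · rintro d hd
    simp only [Finset.coe_filter, Finset.mem_Icc, Set.mem_setOf_eq] at hd ⊢
    obtain ⟨⟨h1, h2⟩, ⟨k, hk⟩, hsmall⟩ := hd
    have hd0 : d ≠ 0 := by omega
    have hq : n / d = k := by rw [hk]; exact Int.mul_ediv_cancel_left k hd0
    have hk1 : 1 ≤ k := by nlinarith
    have hklt : d < k := by nlinarith
    refine ⟨⟨by omega, by rw [hq]; nlinarith⟩, ⟨d, by rw [hq]; linarith [hk, mul_comm d k]⟩, by rw [hq]; nlinarith⟩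
  · rintro d hd
    simp only [Finset.coe_filter, Finset.mem_Icc, Set.mem_setOf_eq] at hd
    obtain ⟨⟨h1, h2⟩, ⟨k, hk⟩, _⟩ := hd
    have hd0 : d ≠ 0 := by omega
    have hq : n / d = k := by rw [hk]; exact Int.mul_ediv_cancel_left k hd0
    have hk1 : 1 ≤ k := by nlinarith
    show n / (n / d) = d
    rw [hq, hk]; exact Int.mul_ediv_cancel _ (by omega)
  · rintro d hd
    simp only [Finset.coe_filter, Finset.mem_Icc, Set.mem_setOf_eq] at hd
    obtain ⟨⟨h1, h2⟩, ⟨k, hk⟩, _⟩ := hd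
    have hd0 : d ≠ 0 := by omega
    have hq : n / d = k := by rw [hk]; exact Int.mul_ediv_cancel_left k hd0
    have hk1 : 1 ≤ k := by nlinarith
    show n / (n / d) = d
    rw [hq, hk]; exact Int.mul_ediv_cancel _ (by omega)

-- total divisor count = 2 * (small divisors) + (square roots)
theorem card_split (n : Int) (hn : 1 ≤ n) :
    (((Finset.Icc 1 n).filter (fun i => i ∣ n)).card : Int)
      = 2 * ((Finset.Icc 1 n).filter (fun d => d ∣ n ∧ d * d < n)).card
        + ((Finset.Icc 1 n).filter (fun d => d ∣ n ∧ d * d = n)).card := by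
  have h1 : ((Finset.Icc 1 n).filter (fun i => i ∣ n)).card
      = ((Finset.Icc 1 n).filter (fun d => d ∣ n ∧ d * d < n)).card
        + ((Finset.Icc 1 n).filter (fun d => d ∣ n ∧ d * d = n)).card
        + ((Finset.Icc 1 n).filter (fun d => d ∣ n ∧ n < d * d)).card := by
    have e1 : (Finset.Icc 1 n).filter (fun i => i ∣ n)
        = ((Finset.Icc 1 n).filter (fun d => d ∣ n ∧ d * d < n))
          ∪ (((Finset.Icc 1 n).filter (fun d => d ∣ n ∧ d * d = n))
          ∪ ((Finset.Icc 1 n).filter (fun d => d ∣ n ∧ n < d * d))) := by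
      ext x
      simp only [Finset.mem_filter, Finset.mem_union]
      constructor
      · rintro ⟨hx, hd⟩
        rcases lt_trichotomy (x * x) n with h | h | h
        · exact Or.inl ⟨hx, hd, h⟩
        · exact Or.inr (Or.inl ⟨hx, hd, h⟩)
        · exact Or.inr (Or.inr ⟨hx, hd, h⟩)
      · rintro (⟨hx, hd, _⟩ | ⟨hx, hd, _⟩ | ⟨hx, hd, _⟩) <;> exact ⟨hx, hd⟩
    rw [e1, Finset.card_union_of_disjoint, Finset.card_union_of_disjoint]
    · omega
    · rw [Finset.disjoint_filter]
      rintro x _ ⟨_, h⟩ ⟨_, h'⟩; omega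
    · rw [Finset.disjoint_left]
      rintro x hx hx'
      simp only [Finset.mem_filter, Finset.mem_union] at hx hx'
      rcases hx' with ⟨_, _, h'⟩ | ⟨_, _, h'⟩ <;> rcases hx with ⟨_, _, h⟩ <;> omega
  rw [h1, card_big_eq_card_small n hn]
  push_cast
  ring

-- the loop invariant of B's while loop
theorem loop_spec (n i count : Int) (hi : 1 ≤ i) :
    checkAltLoop n i count
      = count
        + 2 * (((Finset.Icc 1 n).filter (fun d => d ∣ n ∧ i ≤ d ∧ d * d < n)).card : Int)
        + (((Finset.Icc 1 n).filter (fun d => d ∣ n ∧ i ≤ d ∧ d * d = n)).card : Int) := by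
  rw [checkAltLoop]
  by_cases h : i * i ≤ n
  · have hin : i ≤ n := by nlinarith
    rw [dif_pos h, loop_spec n (i + 1) _ (by omega)]
    have key : ∀ (P : Int → Prop) (_ : DecidablePred P),
        ((i ∣ n ∧ P i) → ((Finset.Icc 1 n).filter (fun d => d ∣ n ∧ i ≤ d ∧ P d)).card
            = ((Finset.Icc 1 n).filter (fun d => d ∣ n ∧ i + 1 ≤ d ∧ P d)).card + 1)
          ∧ (¬ (i ∣ n ∧ P i) → ((Finset.Icc 1 n).filter (fun d => d ∣ n ∧ i ≤ d ∧ P d)).card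
            = ((Finset.Icc 1 n).filter (fun d => d ∣ n ∧ i + 1 ≤ d ∧ P d)).card) := by
      intro P hP
      constructor
      · rintro ⟨hdvd, hPi⟩
        have e : (Finset.Icc 1 n).filter (fun d => d ∣ n ∧ i ≤ d ∧ P d)
            = insert i ((Finset.Icc 1 n).filter (fun d => d ∣ n ∧ i + 1 ≤ d ∧ P d)) := by
          ext x
          simp only [Finset.mem_filter, Finset.mem_insert, Finset.mem_Icc]
          constructor
          · rintro ⟨hx, hd, hle, hp⟩
            rcases eq_or_lt_of_le hle with he | hlt
            · exact Or.inl he.symm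
            · exact Or.inr ⟨hx, hd, by omega, hp⟩
          · rintro (rfl | ⟨hx, hd, hle, hp⟩)
            · exact ⟨⟨hi, hin⟩, hdvd, le_refl _, hPi⟩
            · exact ⟨hx, hd, by omega, hp⟩
        rw [e, Finset.card_insert_of_notMem]
        simp only [Finset.mem_filter]
        rintro ⟨_, _, hle, _⟩; omega
      · intro hni
        congr 1
        ext x
        simp only [Finset.mem_filter, Finset.mem_Icc]
        constructor
        · rintro ⟨hx, hd, hle, hp⟩
          rcases eq_or_lt_of_le hle with he | hlt
          · exact absurd ⟨he ▸ hd, he ▸ hp⟩ hni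
          · exact ⟨hx, hd, by omega, hp⟩
        · rintro ⟨hx, hd, hle, hp⟩
          exact ⟨hx, hd, by omega, hp⟩
    by_cases hdvd : i ∣ n
    · rw [if_pos (by simpa [beq_iff_eq] using (PySem.Int.mod_eq_zero_iff_dvd n i).mpr hdvd)]
      by_cases hsq : i * i = n
      · rw [if_pos (by simpa [beq_iff_eq] using hsq)]
        rw [((key _ inferInstance).2 (by rintro ⟨_, hc⟩; omega) :
              ((Finset.Icc 1 n).filter (fun d => d ∣ n ∧ i ≤ d ∧ d * d < n)).card = _),
            ((key _ inferInstance).1 ⟨hdvd, hsq⟩ :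
              ((Finset.Icc 1 n).filter (fun d => d ∣ n ∧ i ≤ d ∧ d * d = n)).card = _)]
        push_cast; ring
      · rw [if_neg (by simpa [beq_iff_eq] using hsq)]
        have hlt : i * i < n := by omega
        rw [((key _ inferInstance).1 ⟨hdvd, hlt⟩ :
              ((Finset.Icc 1 n).filter (fun d => d ∣ n ∧ i ≤ d ∧ d * d < n)).card = _),
            ((key _ inferInstance).2 (by rintro ⟨_, hc⟩; omega) :
              ((Finset.Icc 1 n).filter (fun d => d ∣ n ∧ i ≤ d ∧ d * d = n)).card = _)]
        push_cast; ring
    · rw [if_neg (by simp [beq_iff_eq, (PySem.Int.mod_eq_zero_iff_dvd n i)]; exact fun h => absurd h hdvd)]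
      rw [((key _ inferInstance).2 (by rintro ⟨hc, _⟩; exact hdvd hc) :
            ((Finset.Icc 1 n).filter (fun d => d ∣ n ∧ i ≤ d ∧ d * d < n)).card = _),
          ((key _ inferInstance).2 (by rintro ⟨hc, _⟩; exact hdvd hc) :
            ((Finset.Icc 1 n).filter (fun d => d ∣ n ∧ i ≤ d ∧ d * d = n)).card = _)]
  · rw [dif_neg h]
    have e1 : (Finset.Icc 1 n).filter (fun d => d ∣ n ∧ i ≤ d ∧ d * d < n) = ∅ := by
      rw [Finset.filter_eq_empty_iff]
      rintro x hx ⟨_, hle, hlt⟩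
      have : i * i ≤ x * x := by nlinarith
      omega
    have e2 : (Finset.Icc 1 n).filter (fun d => d ∣ n ∧ i ≤ d ∧ d * d = n) = ∅ := by
      rw [Finset.filter_eq_empty_iff]
      rintro x hx ⟨_, hle, heq⟩
      have : i * i ≤ x * x := by nlinarith
      omega
    rw [e1, e2]
    simp
termination_by (n + 1 - i).toNat
decreasing_by
  have : i ≤ n := by nlinarith [mul_self_nonneg (i - 1), mul_self_nonneg i]
  omega

-- both counts agree for every n
theorem counts_agree (n : Int) :
    ((PySem.List.pyRange 1 (n + 1) 1).countP (fun i => PySem.Int.mod n i == 0) : Int)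
      = checkAltLoop n 1 0 := by
  rw [check_count, loop_spec n 1 0 (le_refl 1)]
  by_cases hn : 1 ≤ n
  · have e1 : (Finset.Icc 1 n).filter (fun d => d ∣ n ∧ 1 ≤ d ∧ d * d < n)
        = (Finset.Icc 1 n).filter (fun d => d ∣ n ∧ d * d < n) := by
      ext x; simp only [Finset.mem_filter, Finset.mem_Icc]; constructor
      · rintro ⟨hx, hd, _, hp⟩; exact ⟨hx, hd, hp⟩
      · rintro ⟨hx, hd, hp⟩; exact ⟨hx, hd, hx.1, hp⟩
    have e2 : (Finset.Icc 1 n).filter (fun d => d ∣ n ∧ 1 ≤ d ∧ d * d = n)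
        = (Finset.Icc 1 n).filter (fun d => d ∣ n ∧ d * d = n) := by
      ext x; simp only [Finset.mem_filter, Finset.mem_Icc]; constructor
      · rintro ⟨hx, hd, _, hp⟩; exact ⟨hx, hd, hp⟩
      · rintro ⟨hx, hd, hp⟩; exact ⟨hx, hd, hx.1, hp⟩
    rw [e1, e2, card_split n hn]
    ring
  · have hempty : Finset.Icc (1 : Int) n = ∅ := Finset.Icc_eq_empty (by omega)
    simp [hempty]

-- ===== VERDICT (by name: the statement is the Claim_ definition above) =====
theorem check_spec : Claim_equal_check := by
  intro n _
  unfold Spec_check check check_alt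
  have hfold : (PySem.List.pyRange 1 (n + 1) 1).foldl
      (fun count i => if PySem.Int.mod n i == 0 then count + 1 else count) (0 : Int)
      = ((PySem.List.pyRange 1 (n + 1) 1).countP (fun i => PySem.Int.mod n i == 0) : Int) := by
    rw [PySem.List.foldl_if_add_one]
    ring
  have hA : (PySem.List.pyRange 1 (n + 1) 1).foldl
      (fun count i => if PySem.Int.mod n i == 0 then count + 1 else count) (0 : Int)
      = checkAltLoop n 1 0 := hfold.trans (counts_agree n)
  simp only [hA]
  by_cases h2 : (2 : Int) ∣ n
  · have hm : n % 2 = 0 := by omega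
    simp [hm]
  · have hm : n % 2 = 1 := by omega
    simp [hm]
    exact Eq.symm (Bool.beq_eq_decide_eq (checkAltLoop n 1 0) 8)
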